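-- pv_equiv track=rewrite | github.com/virentanna/pythonprograms | EvenOddSort.py | EvenOddSort
-- ===== SOURCE A (Python) =====
-- def EvenOddSort(arr):
--     idx = 0
--     length = len(arr)
--     while idx < length:
--         if arr[idx] % 2 != 0:
--             arr.append(arr[idx])
--             arr.pop(idx)
--             length -= 1
--         else:
--             idx += 1
--     return arr
-- ===== SOURCE B (Python) =====
-- def EvenOddSort(arr):
--     arr.sort(key=lambda x: x % 2 != 0)
--     return arr
-- ===== Notes on version B (the rewrite author's own statement) =====
-- stated objective: idiomatic
-- what changed: Replaces the index-walk that pops each odd element and re-appends it at the end with a single in-place stable sort keyed by the boolean x % 2 != 0, which stably partitions evens before odds.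
import Mathlib
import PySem

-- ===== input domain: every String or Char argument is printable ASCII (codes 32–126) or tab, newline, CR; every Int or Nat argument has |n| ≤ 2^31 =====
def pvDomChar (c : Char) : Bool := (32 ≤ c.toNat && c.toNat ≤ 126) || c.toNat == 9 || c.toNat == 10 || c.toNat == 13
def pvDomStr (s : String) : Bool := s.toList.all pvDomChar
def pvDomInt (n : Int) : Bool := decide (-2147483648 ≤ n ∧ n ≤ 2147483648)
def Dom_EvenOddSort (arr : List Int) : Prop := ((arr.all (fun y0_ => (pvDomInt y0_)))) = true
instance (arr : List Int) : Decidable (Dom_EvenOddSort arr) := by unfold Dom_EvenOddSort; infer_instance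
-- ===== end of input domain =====

-- B replaces A's pop/append index walk with one in-place stable sort keyed by parity;
-- both mutate arr in place in Python, and the equivalence proved here is about the return value.

-- ===== PORT A =====
-- A's while loop: idx and the live length change, the list is mutated by append + pop(idx).
def evenOddLoop (arr : List Int) (idx length : Nat) : List Int :=
  if _h : idx < length then
    match PySem.List.pyGet? arr (idx : Int) with
    | none => arr  -- unreachable: idx < length ≤ arr.length throughout
    | some v =>
      if PySem.Int.mod v 2 ≠ 0 then
        evenOddLoop ((arr ++ [v]).eraseIdx idx) idx (length - 1)
      else
        evenOddLoop arr (idx + 1) length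
  else arr
termination_by length - idx
decreasing_by all_goals omega

def EvenOddSort (arr : List Int) : List Int := evenOddLoop arr 0 arr.length

-- ===== PORT B =====
-- arr.sort(key=lambda x: x % 2 != 0); return arr
def EvenOddSort_alt (arr : List Int) : List Int :=
  PySem.List.sorted arr (fun x => decide (PySem.Int.mod x 2 ≠ 0))

-- ===== PRECONDITION & SPEC =====
def Spec_EvenOddSort (arr : List Int) (out : List Int) : Prop := out = EvenOddSort_alt arr
instance (arr : List Int) (out : List Int) : Decidable (Spec_EvenOddSort arr out) := by unfold Spec_EvenOddSort; infer_instance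

-- ===== CLAIM (what is proved, stated in full; the proofs are below) =====
def Claim_equal_EvenOddSort : Prop := ∀ (arr : List Int), Dom_EvenOddSort arr → Spec_EvenOddSort arr (EvenOddSort arr)

-- ===== LEMMAS AND PROOFS =====

-- the parity key used by B
def pKey (x : Int) : Bool := decide (PySem.Int.mod x 2 ≠ 0)

-- inserting x (with all of evens not "before"-related and the head of odds "before"-related)
-- lands exactly between evens and odds
theorem insertBy_mid (before : Int → Int → Bool) (x : Int) (evens odds : List Int)
    (h1 : ∀ e ∈ evens, before x e = false)
    (h2 : ∀ o t, odds = o :: t → before x o = true) :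
    PySem.List.insertBy before x (evens ++ odds) = evens ++ x :: odds := by
  induction evens with
  | nil =>
    cases odds with
    | nil => simp [PySem.List.insertBy]
    | cons o t => simp [PySem.List.insertBy, h2 o t rfl]
  | cons e es ih =>
    have he : before x e = false := h1 e (by simp)
    simp only [List.cons_append, PySem.List.insertBy, he]
    simp only [Bool.false_eq_true, if_false, List.cons.injEq, true_and]
    exact ih (fun e' he' => h1 e' (by simp [he']))

-- B's stable sort by the boolean key is the stable two-way partition: evens then odds
theorem sorted_pKey_eq_partition (xs : List Int) :
    PySem.List.sorted xs pKey =
      xs.filter (fun x => !pKey x) ++ xs.filter (fun x => pKey x) := by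
  rw [PySem.List.sorted_eq_foldl_insertBy]
  suffices h : ∀ (xs evens odds : List Int),
      (∀ e ∈ evens, pKey e = false) → (∀ o ∈ odds, pKey o = true) →
      xs.foldl (fun acc x => PySem.List.insertBy (fun a b => decide (pKey a < pKey b)) x acc)
        (evens ++ odds)
        = evens ++ xs.filter (fun x => !pKey x) ++ (odds ++ xs.filter (fun x => pKey x)) by
    simpa using h xs [] [] (by simp) (by simp)
  intro xs
  induction xs with
  | nil => intro evens odds _ _; simp
  | cons x t ih =>
    intro evens odds he ho
    by_cases hk : pKey x = true
    · have hins : PySem.List.insertBy (fun a b => decide (pKey a < pKey b)) x (evens ++ odds)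
          = (evens ++ odds) ++ [x] := by
        apply PySem.List.insertBy_of_forall_not_before
        intro y _
        cases hpk : pKey y <;> simp [hk]
      have ho' : ∀ o ∈ odds ++ [x], pKey o = true := by
        intro o hh
        rcases List.mem_append.mp hh with h' | h'
        · exact ho o h'
        · simp at h'; subst h'; exact hk
      rw [List.foldl_cons, hins, List.append_assoc, ih evens (odds ++ [x]) he ho']
      simp [hk]
    · have hk' : pKey x = false := by simpa using hk
      have hins : PySem.List.insertBy (fun a b => decide (pKey a < pKey b)) x (evens ++ odds)
          = evens ++ x :: odds := by
        apply insertBy_mid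
        · intro e heq; simp [hk', he e heq]
        · intro o t' hot
          have := ho o (by simp [hot])
          simp [hk', this]
      have he' : ∀ e ∈ evens ++ [x], pKey e = false := by
        intro e hh
        rcases List.mem_append.mp hh with h' | h'
        · exact he e h'
        · simp at h'; subst h'; exact hk'
      have hsplit : evens ++ x :: odds = (evens ++ [x]) ++ odds := by simp
      rw [List.foldl_cons, hins, hsplit, ih (evens ++ [x]) odds he' ho]
      simp [hk']

theorem eraseIdx_append_len (pre : List Int) (v : Int) (r : List Int) :
    (pre ++ v :: r).eraseIdx pre.length = pre ++ r := by
  induction pre with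
  | nil => simp
  | cons p ps ih => simp [ih]

-- the loop never inspects indices below idx: characterise it over the unprocessed segment
theorem evenOddLoop_eq (rest : List Int) : ∀ (pre post : List Int),
    evenOddLoop (pre ++ rest ++ post) pre.length (pre.length + rest.length)
      = pre ++ rest.filter (fun x => !pKey x) ++ post ++ rest.filter (fun x => pKey x) := by
  induction rest with
  | nil => intro pre post; rw [evenOddLoop]; simp
  | cons v t ih =>
    intro pre post
    rw [evenOddLoop]
    have hlt : pre.length < pre.length + (v :: t).length := by simp
    rw [dif_pos hlt]
    have hget : PySem.List.pyGet? (pre ++ (v :: t) ++ post) (pre.length : Int) = some v := by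
      simp
    simp only [hget]
    by_cases hk : PySem.Int.mod v 2 ≠ 0
    · rw [if_pos hk]
      have hkey : pKey v = true := by simp [pKey, PySem.Int.mod] at hk ⊢; omega
      have herase : ((pre ++ (v :: t) ++ post) ++ [v]).eraseIdx pre.length
          = pre ++ t ++ (post ++ [v]) := by
        have : (pre ++ (v :: t) ++ post) ++ [v] = pre ++ v :: (t ++ post ++ [v]) := by simp
        rw [this, eraseIdx_append_len]; simp
      have hlen : pre.length + (v :: t).length - 1 = pre.length + t.length := by simp
      rw [herase, hlen, ih pre (post ++ [v])]
      simp [hkey]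
    · rw [if_neg hk]
      have hkey : pKey v = false := by simp [pKey] at hk ⊢; omega
      have harr : pre ++ (v :: t) ++ post = (pre ++ [v]) ++ t ++ post := by simp
      have hidx : pre.length + 1 = (pre ++ [v]).length := by simp
      have hlen : pre.length + (v :: t).length = (pre ++ [v]).length + t.length := by
        simp; omega
      rw [harr, hidx, hlen, ih (pre ++ [v]) post]
      simp [hkey]

-- ===== VERDICT (by name: the statement is the Claim_ definition above) =====
theorem EvenOddSort_spec : Claim_equal_EvenOddSort := by
  intro arr _
  show EvenOddSort arr = EvenOddSort_alt arr
  have h := evenOddLoop_eq arr [] []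
  simp only [List.nil_append, List.append_nil, List.length_nil] at h
  have hA : EvenOddSort arr = arr.filter (fun x => !pKey x) ++ arr.filter (fun x => pKey x) := by
    unfold EvenOddSort
    simpa using h
  rw [hA, EvenOddSort_alt]
  exact (sorted_pKey_eq_partition arr).symm
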